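-- pv_equiv track=rewrite | github.com/passionworkeer/tengxun_open | testcases/d30-d32-state-machine/D30-03-Java-Connection-Pool-Not-Returned/test_patch.py | _strip_java_comments
-- ===== SOURCE A (Python) =====
-- def _strip_java_comments(src: str) -> str:
--     """Remove all // and /* */ comments from Java source (keeps code intact)."""
--     result = []
--     i = 0
--     n = len(src)
--     while i < n:
--         if src[i:i+2] == '//':
--             # Single-line comment: skip to end of line
--             eol = src.find('\n', i)
--             if eol == -1: break
--             i = eol + 1
--         elif src[i:i+2] == '/*':
--             # Multi-line comment: skip to closing */
--             end = src.find('*/', i+2)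
--             if end == -1: break
--             i = end + 2
--         else:
--             result.append(src[i])
--             i += 1
--     return ''.join(result)
-- ===== SOURCE B (Python) =====
-- def _strip_java_comments(src: str) -> str:
--     """Remove all // and /* */ comments via a character-by-character state machine."""
--     NORMAL, SLASH, LINE, BLOCK, BLOCK_STAR = range(5)
--     state = NORMAL
--     out = []
--     for ch in src:
--         if state == NORMAL:
--             if ch == '/':
--                 state = SLASH
--             else:
--                 out.append(ch)
--         elif state == SLASH:
--             if ch == '/':
--                 state = LINE
--             elif ch == '*':
--                 state = BLOCK
--             else:
--                 out.append('/')
--                 out.append(ch)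
--                 state = NORMAL
--         elif state == LINE:
--             if ch == '\n':
--                 state = NORMAL  # the newline ending a line comment is dropped too
--         elif state == BLOCK:
--             if ch == '*':
--                 state = BLOCK_STAR
--         else:  # BLOCK_STAR
--             if ch == '/':
--                 state = NORMAL
--             elif ch != '*':
--                 state = BLOCK
--     if state == SLASH:
--         out.append('/')
--     return ''.join(out)
-- ===== Notes on version B (the rewrite author's own statement) =====
-- stated objective: idiomatic
-- what changed: Replaces A's find-and-jump index scan (slicing src[i:i+2] and calling str.find to leap over comments) with a single character-by-character state machine (NORMAL/SLASH/LINE/BLOCK/BLOCK_STAR) that never slices or searches.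
import Mathlib
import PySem

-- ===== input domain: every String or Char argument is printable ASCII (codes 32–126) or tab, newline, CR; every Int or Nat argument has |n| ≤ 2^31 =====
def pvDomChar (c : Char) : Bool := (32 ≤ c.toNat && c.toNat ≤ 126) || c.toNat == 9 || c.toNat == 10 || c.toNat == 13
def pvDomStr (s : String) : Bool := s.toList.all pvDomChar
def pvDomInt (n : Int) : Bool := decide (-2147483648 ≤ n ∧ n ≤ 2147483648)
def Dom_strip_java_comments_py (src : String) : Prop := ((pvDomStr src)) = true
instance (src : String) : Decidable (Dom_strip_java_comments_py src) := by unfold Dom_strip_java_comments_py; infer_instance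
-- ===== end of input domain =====

-- B replaces A's find-and-jump scan with a character-by-character state machine (alternative decomposition).

-- ===== PORT A =====
-- Hand port of A's while loop over the suffix src[i:]: `src[i:i+2]` is `take 2` of the
-- suffix; `src.find('\n', i)` / `src.find('*/', i+2)` together with the jumps `i = eol+1` /
-- `i = end+2` are encoded exactly by these helpers, which return the suffix of src after the
-- first occurrence, or none where Python's find returns -1 (A then breaks).
def pvDropAfterNl : List Char → Option (List Char)
  | [] => none
  | c :: rest => if c = '\n' then some rest else pvDropAfterNl rest

def pvDropAfterStarSlash : List Char → Option (List Char)
  | c1 :: c2 :: rest =>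
      if c1 = '*' ∧ c2 = '/' then some rest else pvDropAfterStarSlash (c2 :: rest)
  | _ => none
termination_by l => l.length

theorem pvDropAfterNl_lt (l r : List Char) (h : pvDropAfterNl l = some r) :
    r.length < l.length := by
  induction l with
  | nil => simp [pvDropAfterNl] at h
  | cons c rest ih =>
    simp only [pvDropAfterNl] at h
    split at h
    · cases h; simp
    · have := ih h; simp; omega

theorem pvDropAfterStarSlash_lt : ∀ (l r : List Char), pvDropAfterStarSlash l = some r → r.length < l.length := by
  intro l
  induction l with
  | nil => intro r h; simp [pvDropAfterStarSlash] at h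
  | cons c1 t ih =>
    intro r h
    cases t with
    | nil => simp [pvDropAfterStarSlash] at h
    | cons c2 u =>
      rw [pvDropAfterStarSlash] at h
      split at h
      · cases h; simp
      · have := ih r h; simp at this ⊢; omega

-- the while loop: state (result, i), recursion on the remaining suffix src[i:]
def pvAGo (res : List Char) (l : List Char) : List Char :=
  match l with
  | [] => res                                   -- i = n: loop ends
  | c :: rest =>
    if (c :: rest).take 2 = ['/', '/'] then     -- src[i:i+2] == '//'
      match hf : pvDropAfterNl (c :: rest) with
      | none => res                             -- eol == -1: break
      | some r => pvAGo res r                   -- i = eol + 1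
    else if (c :: rest).take 2 = ['/', '*'] then -- src[i:i+2] == '/*'
      match hf : pvDropAfterStarSlash ((c :: rest).drop 2) with
      | none => res                             -- end == -1: break
      | some r => pvAGo res r                   -- i = end + 2
    else
      pvAGo (res ++ [c]) rest                   -- result.append(src[i]); i += 1
termination_by l.length
decreasing_by
  · exact pvDropAfterNl_lt _ _ hf
  · have := pvDropAfterStarSlash_lt _ _ hf; simp at this ⊢; omega
  · simp

def strip_java_comments_py (src : String) : String := String.mk (pvAGo [] src.toList)

-- ===== PORT B =====
-- state machine: 0 = NORMAL, 1 = SLASH (just saw '/'), 2 = LINE, 3 = BLOCK, 4 = BLOCK_STAR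
def pvAltGo : List Char → Nat → List Char → List Char
  | [], state, out => if state = 1 then out ++ ['/'] else out
  | c :: rest, state, out =>
    if state = 0 then
      if c = '/' then pvAltGo rest 1 out else pvAltGo rest 0 (out ++ [c])
    else if state = 1 then
      if c = '/' then pvAltGo rest 2 out
      else if c = '*' then pvAltGo rest 3 out
      else pvAltGo rest 0 (out ++ ['/', c])
    else if state = 2 then
      if c = '\n' then pvAltGo rest 0 out else pvAltGo rest 2 out
    else if state = 3 then
      if c = '*' then pvAltGo rest 4 out else pvAltGo rest 3 out
    else
      if c = '/' then pvAltGo rest 0 out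
      else if c = '*' then pvAltGo rest 4 out
      else pvAltGo rest 3 out

def strip_java_comments_py_alt (src : String) : String := String.mk (pvAltGo src.toList 0 [])

-- ===== PRECONDITION & SPEC =====
def Spec_strip_java_comments_py (src : String) (out : String) : Prop := out = strip_java_comments_py_alt src
instance (src : String) (out : String) : Decidable (Spec_strip_java_comments_py src out) := by unfold Spec_strip_java_comments_py; infer_instance

-- ===== CLAIM (what is proved, stated in full; the proofs are below) =====
def Claim_equal_strip_java_comments_py : Prop := ∀ (src : String), Dom_strip_java_comments_py src → Spec_strip_java_comments_py src (strip_java_comments_py src)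

-- ===== LEMMAS AND PROOFS =====

-- In state LINE, B consumes chars up to and including the first '\n' (or everything).
theorem pvAltGo_line (l : List Char) (res : List Char) :
    pvAltGo l 2 res = match pvDropAfterNl l with
      | none => res
      | some r => pvAltGo r 0 res := by
  induction l generalizing res with
  | nil => simp [pvAltGo, pvDropAfterNl]
  | cons c rest ih =>
    by_cases h : c = '\n'
    · simp [pvAltGo, pvDropAfterNl, h]
    · simp [pvAltGo, pvDropAfterNl, h, ih]

theorem pvDropAfterStarSlash_cons (c : Char) (t : List Char) (h : c ≠ '*') :
    pvDropAfterStarSlash (c :: t) = pvDropAfterStarSlash t := by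
  cases t with
  | nil => simp [pvDropAfterStarSlash]
  | cons b u => simp [pvDropAfterStarSlash, h]

-- In states BLOCK / BLOCK_STAR, B consumes chars up to and including the first "*/".
theorem pvAltGo_block (l : List Char) :
    (∀ res, pvAltGo l 3 res = match pvDropAfterStarSlash l with
      | none => res
      | some r => pvAltGo r 0 res) ∧
    (∀ res, pvAltGo l 4 res = match pvDropAfterStarSlash ('*' :: l) with
      | none => res
      | some r => pvAltGo r 0 res) := by
  induction l with
  | nil => constructor <;> intro res <;> simp [pvAltGo, pvDropAfterStarSlash]
  | cons c t ih =>
    obtain ⟨ih3, ih4⟩ := ih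
    constructor
    · intro res
      by_cases h : c = '*'
      · subst h; simpa [pvAltGo] using ih4 res
      · rw [pvDropAfterStarSlash_cons c t h]
        simpa [pvAltGo, h] using ih3 res
    · intro res
      by_cases h : c = '/'
      · subst h; simp [pvAltGo, pvDropAfterStarSlash]
      · by_cases h2 : c = '*'
        · subst h2
          have he : pvDropAfterStarSlash ('*' :: '*' :: t) = pvDropAfterStarSlash ('*' :: t) := by
            simp [pvDropAfterStarSlash]
          rw [he]; simpa [pvAltGo] using ih4 res
        · have he : pvDropAfterStarSlash ('*' :: c :: t) = pvDropAfterStarSlash t := by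
            rw [show pvDropAfterStarSlash ('*' :: c :: t) = pvDropAfterStarSlash (c :: t) by
                  simp [pvDropAfterStarSlash, h],
                pvDropAfterStarSlash_cons c t h2]
          rw [he]; simpa [pvAltGo, h, h2] using ih3 res

theorem pvAGo_eq_pvAltGo : ∀ (res l : List Char), pvAGo res l = pvAltGo l 0 res := by
  intro res l
  induction res, l using pvAGo.induct with
  | case1 res => rw [pvAGo]; simp [pvAltGo]
  | case2 res c rest htake hf =>
    cases rest with
    | nil => simp at htake
    | cons b u =>
      simp at htake; obtain ⟨rfl, rfl⟩ := htake
      have hnl : pvDropAfterNl u = none := by simpa [pvDropAfterNl] using hf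
      conv_lhs => rw [pvAGo]
      rw [if_pos (by simp)]
      split
      · simp [pvAltGo, pvAltGo_line, hnl]
      · rename_i r' heq; simp [hf] at heq
  | case3 res c rest htake r hf ih =>
    cases rest with
    | nil => simp at htake
    | cons b u =>
      simp at htake; obtain ⟨rfl, rfl⟩ := htake
      have hnl : pvDropAfterNl u = some r := by simpa [pvDropAfterNl] using hf
      conv_lhs => rw [pvAGo]
      rw [if_pos (by simp)]
      split
      · rename_i heq; simp [hf] at heq
      · rename_i r' heq
        simp [hf] at heq
        subst heq
        rw [ih]
        simp [pvAltGo, pvAltGo_line, hnl]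
  | case4 res c rest htake1 htake2 hf =>
    cases rest with
    | nil => simp at htake2
    | cons b u =>
      simp at htake2; obtain ⟨rfl, rfl⟩ := htake2
      have hb : pvDropAfterStarSlash u = none := by simpa using hf
      conv_lhs => rw [pvAGo]
      rw [if_neg htake1, if_pos (by simp)]
      split
      · simp [pvAltGo, (pvAltGo_block u).1, hb]
      · rename_i r' heq; simp [hb] at heq
  | case5 res c rest htake1 htake2 r hf ih =>
    cases rest with
    | nil => simp at htake2
    | cons b u =>
      simp at htake2; obtain ⟨rfl, rfl⟩ := htake2
      have hb : pvDropAfterStarSlash u = some r := by simpa using hf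
      conv_lhs => rw [pvAGo]
      rw [if_neg htake1, if_pos (by simp)]
      split
      · rename_i heq; simp [hb] at heq
      · rename_i r' heq
        simp [hb] at heq
        subst heq
        rw [ih]
        simp [pvAltGo, (pvAltGo_block u).1, hb]
  | case6 res c rest htake1 htake2 ih =>
    by_cases h : c = '/'
    · subst h
      cases rest with
      | nil =>
        conv_lhs => rw [pvAGo]
        rw [if_neg (by simp), if_neg (by simp)]
        rw [ih]
        simp [pvAltGo]
      | cons c2 t =>
        have h2 : c2 ≠ '/' := by rintro rfl; simp at htake1
        have h3 : c2 ≠ '*' := by rintro rfl; simp at htake2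
        conv_lhs => rw [pvAGo]
        rw [if_neg htake1, if_neg htake2]
        rw [ih]
        simp [pvAltGo, h2, h3]
    · conv_lhs => rw [pvAGo]
      rw [if_neg htake1, if_neg htake2]
      rw [ih]
      simp [pvAltGo, h]

-- ===== VERDICT (by name: the statement is the Claim_ definition above) =====
theorem strip_java_comments_py_spec : Claim_equal_strip_java_comments_py := by
  intro src _
  unfold Spec_strip_java_comments_py strip_java_comments_py strip_java_comments_py_alt
  rw [pvAGo_eq_pvAltGo]
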